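-- pv_equiv track=rewrite | github.com/Abhi-dhamdhere/AI-Finantial-Analyst | ai-financial-analyst/analyzer.py | clean_output
-- ===== SOURCE A (Python) =====
-- def clean_output(text: str) -> str:
--     """
--     Light cleanup that preserves markdown structure.
--
--     - Strips leading/trailing whitespace per line
--     - Collapses 3+ consecutive blank lines → 2  (keeps section spacing)
--     - Does NOT remove all blank lines (that would destroy markdown headers/lists)
--     """
--     lines = [line.rstrip() for line in text.split("\n")]
--
--     cleaned: list[str] = []
--     blank_run = 0
--     for line in lines:
--         if line == "":
--             blank_run += 1
--             if blank_run <= 2:          # allow max 2 consecutive blanks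
--                 cleaned.append("")
--         else:
--             blank_run = 0
--             cleaned.append(line)
--
--     return "\n".join(cleaned).strip()
-- ===== SOURCE B (Python) =====
-- import re
--
-- def clean_output(text: str) -> str:
--     s = "\n".join(line.rstrip() for line in text.split("\n"))
--     return re.sub(r"\n{4,}", "\n\n\n", s).strip()
-- ===== Notes on version B (the rewrite author's own statement) =====
-- stated objective: idiomatic
-- what changed: A's blank_run counter loop with conditional appends is replaced by one regex substitution: after the same per-line rstrip, a single re.sub collapses every maximal run of four or more newlines to exactly three (= 3+ consecutive blank lines to 2), then a final strip.
import Mathlib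
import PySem

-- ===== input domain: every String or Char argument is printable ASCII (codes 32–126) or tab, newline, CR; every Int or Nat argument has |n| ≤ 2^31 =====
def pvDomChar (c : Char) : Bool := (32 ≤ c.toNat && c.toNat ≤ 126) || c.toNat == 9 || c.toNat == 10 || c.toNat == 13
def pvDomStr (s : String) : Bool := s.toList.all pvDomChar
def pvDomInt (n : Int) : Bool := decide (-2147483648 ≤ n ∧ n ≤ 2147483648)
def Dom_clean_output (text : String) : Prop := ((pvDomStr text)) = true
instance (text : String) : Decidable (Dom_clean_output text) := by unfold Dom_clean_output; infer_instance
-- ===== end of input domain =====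

-- B rewrites A's blank_run counter loop as one regex substitution (collapse runs of ≥4 '\n' to 3) after the same per-line rstrip; objective: idiomatic.

-- ===== PORT A =====
-- A, step for step, on List Char: split on '\n', rstrip each line, counter loop
-- appending to `cleaned`, join with '\n', strip.
def clean_output (text : String) : String :=
  let lines := (PySem.Chars.splitOn text.toList ['\n']).map PySem.Chars.rstrip
  let st := lines.foldl
    (fun (st : List (List Char) × Int) line =>
      if line = [] then
        ((if st.2 + 1 ≤ 2 then st.1 ++ [([] : List Char)] else st.1), st.2 + 1)
      else (st.1 ++ [line], (0 : Int)))
    ([], 0)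
  String.ofList (PySem.Chars.strip (PySem.Chars.join ['\n'] st.1))

-- ===== PORT B =====
-- hand port of B's re.sub (pattern: four or more newlines, replacement: three
-- newlines): every maximal run of k ≥ 4 newlines
-- becomes 3 newlines, shorter runs (k ≤ 3, i.e. min k 3 = k) are left as they are —
-- exactly what the left-to-right regex substitution does.
def collapseNl : List Char → List Char
  | [] => []
  | c :: rest =>
    if c = '\n' then
      List.replicate (min (1 + (rest.takeWhile (· == '\n')).length) 3) '\n'
        ++ collapseNl (rest.dropWhile (· == '\n'))
    else c :: collapseNl rest
  termination_by cs => cs.length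
  decreasing_by
    · exact Nat.lt_succ_of_le (List.Sublist.length_le (List.dropWhile_sublist _))
    · simp

def clean_output_alt (text : String) : String :=
  let s := PySem.Chars.join ['\n']
    ((PySem.Chars.splitOn text.toList ['\n']).map PySem.Chars.rstrip)
  String.ofList (PySem.Chars.strip (collapseNl s))

-- ===== PRECONDITION & SPEC =====
def Spec_clean_output (text : String) (out : String) : Prop := out = clean_output_alt text
instance (text : String) (out : String) : Decidable (Spec_clean_output text out) := by unfold Spec_clean_output; infer_instance

-- ===== CLAIM (what is proved, stated in full; the proofs are below) =====
def Claim_equal_clean_output : Prop := ∀ (text : String), Dom_clean_output text → Spec_clean_output text (clean_output text)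

-- ===== LEMMAS AND PROOFS =====

def consHead (x : List Char) : List (List Char) → List (List Char)
  | [] => [x]
  | h :: t => (x ++ h) :: t

def splitNl : List Char → List (List Char)
  | [] => [[]]
  | c :: rest => if c = '\n' then [] :: splitNl rest else consHead [c] (splitNl rest)

lemma splitNl_ne_nil (cs : List Char) : splitNl cs ≠ [] := by
  induction cs with
  | nil => simp [splitNl]
  | cons c rest ih =>
    simp only [splitNl]
    split
    · simp
    · cases h : splitNl rest <;> simp [consHead]

lemma consHead_assoc (x : List Char) (c : Char) (L : List (List Char)) :
    consHead (x ++ [c]) L = consHead x (consHead [c] L) := by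
  cases L <;> simp [consHead]

lemma go_eq (fuel : Nat) : ∀ (l cur : List Char) (acc : List (List Char)),
    l.length < fuel →
    PySem.Chars.splitOn.go ['\n'] fuel l cur acc
      = acc.reverse ++ consHead cur.reverse (splitNl l) := by
  induction fuel with
  | zero => intro l cur acc h; omega
  | succ f ih =>
    intro l cur acc h
    rw [PySem.Chars.splitOn.go.eq_def]
    cases l with
    | nil => simp [splitNl, consHead]
    | cons c rest =>
      simp only []
      by_cases hc : c = '\n'
      · subst hc
        have hp : List.isPrefixOf ['\n'] ('\n' :: rest) = true := by
          simp [List.isPrefixOf]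
        simp only [hp, if_true, List.length_cons, List.length_nil, List.drop_succ_cons, List.drop_zero]
        rw [ih rest [] (cur.reverse :: acc) (by simpa using Nat.lt_of_succ_lt_succ h)]
        cases hs : splitNl rest with
        | nil => exact absurd hs (splitNl_ne_nil rest)
        | cons h0 t0 =>
          simp [splitNl, hs, consHead]
      · have hp : List.isPrefixOf ['\n'] (c :: rest) = false := by
          simp [List.isPrefixOf, BEq.beq]
          intro hcc; exact absurd hcc.symm hc
        simp only [hp]
        rw [if_neg (by simp)]
        rw [ih rest (c :: cur) acc (by simpa using Nat.lt_of_succ_lt_succ h)]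
        simp only [splitNl, if_neg hc, List.reverse_cons]
        rw [consHead_assoc]

lemma splitOn_eq_splitNl (cs : List Char) :
    PySem.Chars.splitOn cs ['\n'] = splitNl cs := by
  unfold PySem.Chars.splitOn
  rw [go_eq (cs.length + 1) cs [] [] (by omega)]
  cases hs : splitNl cs with
  | nil => exact absurd hs (splitNl_ne_nil cs)
  | cons h t => simp [consHead]

lemma nl_not_mem_splitNl (cs : List Char) (l : List Char) (h : l ∈ splitNl cs) :
    '\n' ∉ l := by
  induction cs generalizing l with
  | nil => simp [splitNl] at h; simp [h]
  | cons c rest ih =>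
    simp only [splitNl] at h
    split at h
    · rcases List.mem_cons.1 h with rfl | h2
      · simp
      · exact ih l h2
    · cases hs : splitNl rest with
      | nil => exact absurd hs (splitNl_ne_nil rest)
      | cons h0 t0 =>
        rw [hs] at h
        simp only [consHead] at h
        rcases List.mem_cons.1 h with rfl | h2
        · intro hm
          rcases List.mem_cons.1 hm with hc2 | hm2
          · rename_i hc; exact hc hc2.symm
          · exact ih h0 (hs ▸ List.mem_cons_self ..) (by simpa using hm2)
        · exact ih l (hs ▸ List.mem_cons.2 (Or.inr h2))

lemma nl_not_mem_rstrip (l : List Char) (h : '\n' ∉ l) :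
    '\n' ∉ PySem.Chars.rstrip l := by
  unfold PySem.Chars.rstrip
  intro hm
  rw [List.mem_reverse] at hm
  exact h (List.mem_reverse.1 ((List.dropWhile_sublist _).mem hm))

def capA : List (List Char) → Int → List (List Char)
  | [], _ => []
  | l :: t, r =>
    if l = [] then
      (if r + 1 ≤ 2 then ([] : List Char) :: capA t (r + 1) else capA t (r + 1))
    else l :: capA t 0

def stA : List (List Char) → Int → Int
  | [], r => r
  | l :: t, r => if l = [] then stA t (r + 1) else stA t 0

lemma foldA_eq_capA (ls : List (List Char)) (acc : List (List Char)) (r : Int) :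
    (ls.foldl
      (fun (st : List (List Char) × Int) line =>
        if line = [] then
          ((if st.2 + 1 ≤ 2 then st.1 ++ [([] : List Char)] else st.1), st.2 + 1)
        else (st.1 ++ [line], (0 : Int)))
      (acc, r)).1 = acc ++ capA ls r := by
  induction ls generalizing acc r with
  | nil => simp [capA]
  | cons l t ih =>
    simp only [List.foldl_cons]
    by_cases hl : l = []
    · by_cases hr : r + 1 ≤ 2
      · rw [if_pos hl, if_pos hr, ih]
        simp [capA, hl, hr]
      · rw [if_pos hl, if_neg hr, ih]
        simp [capA, hl, hr]
    · rw [if_neg hl, ih]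
      simp [capA, hl]

lemma capA_append (xs ys : List (List Char)) (r : Int) :
    capA (xs ++ ys) r = capA xs r ++ capA ys (stA xs r) := by
  induction xs generalizing r with
  | nil => simp [capA, stA]
  | cons l t ih =>
    by_cases hl : l = [] <;> by_cases hr : r + 1 ≤ 2 <;>
      simp [capA, stA, hl, hr, ih]

lemma capA_replicate (a : Nat) (r : Int) (hr : 0 ≤ r) :
    capA (List.replicate a ([] : List Char)) r
      = List.replicate (min a (2 - r).toNat) [] := by
  induction a generalizing r with
  | zero => simp [capA]
  | succ n ih =>
    rw [List.replicate_succ]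
    simp only [capA, reduceIte]
    by_cases hr2 : r + 1 ≤ 2
    · rw [if_pos hr2, ih (r + 1) (by omega)]
      have : min (n + 1) (2 - r).toNat = min n (2 - (r + 1)).toNat + 1 := by omega
      rw [this, List.replicate_succ]
    · rw [if_neg hr2, ih (r + 1) (by omega)]
      have : (2 - r).toNat = 0 := by omega
      have h2 : (2 - (r + 1)).toNat = 0 := by omega
      simp [this, h2]

lemma stA_replicate (a : Nat) (r : Int) :
    stA (List.replicate a ([] : List Char)) r = r + a := by
  induction a generalizing r with
  | zero => simp [stA]
  | succ n ih =>
    rw [List.replicate_succ]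
    simp only [stA, reduceIte, ih]
    omega

lemma capA_cons_nonblank (l : List Char) (t : List (List Char)) (r : Int) (h : l ≠ []) :
    capA (l :: t) r = l :: capA t 0 := by simp [capA, h]

lemma stA_zero_of_last_nonblank (xs : List (List Char)) (r : Int)
    (h : xs.getLast? ≠ some []) (hne : xs ≠ []) : stA xs r = 0 := by
  induction xs generalizing r with
  | nil => exact absurd rfl hne
  | cons l t ih =>
    cases t with
    | nil =>
      have hl : l ≠ [] := by simpa using h
      simp [stA, hl]
    | cons m t2 =>
      have h2 : (m :: t2).getLast? ≠ some [] := by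
        rwa [List.getLast?_cons_cons] at h
      by_cases hl : l = []
      · rw [show stA (l :: m :: t2) r = stA (m :: t2) (r + 1) from by simp [stA, hl]]
        exact ih _ h2 (by simp)
      · rw [show stA (l :: m :: t2) r = stA (m :: t2) 0 from by simp [stA, hl]]
        exact ih _ h2 (by simp)

lemma join_cons (x : List Char) (t : List (List Char)) (ht : t ≠ []) :
    PySem.Chars.join ['\n'] (x :: t) = x ++ '\n' :: PySem.Chars.join ['\n'] t := by
  cases t with
  | nil => exact absurd rfl ht
  | cons y t2 => rw [PySem.Chars.join_cons_cons]; simp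

lemma join_replicate_prefix (a : Nat) (t : List (List Char)) (ht : t ≠ []) :
    PySem.Chars.join ['\n'] (List.replicate a [] ++ t)
      = List.replicate a '\n' ++ PySem.Chars.join ['\n'] t := by
  induction a with
  | zero => simp
  | succ n ih =>
    rw [List.replicate_succ, List.cons_append,
      join_cons _ _ (by simp [ht]), ih, List.replicate_succ]
    simp

lemma join_snoc (s : List (List Char)) (x : List Char) (hs : s ≠ []) :
    PySem.Chars.join ['\n'] (s ++ [x]) = PySem.Chars.join ['\n'] s ++ '\n' :: x := by
  induction s with
  | nil => exact absurd rfl hs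
  | cons y t ih =>
    cases t with
    | nil => simp [PySem.Chars.join_cons_cons, PySem.Chars.join_singleton]
    | cons z t2 =>
      simp only [List.cons_append]
      rw [PySem.Chars.join_cons_cons, PySem.Chars.join_cons_cons,
        ← List.cons_append, ih (by simp)]
      simp

lemma join_replicate_suffix (b : Nat) (t : List (List Char)) (ht : t ≠ []) :
    PySem.Chars.join ['\n'] (t ++ List.replicate b [])
      = PySem.Chars.join ['\n'] t ++ List.replicate b '\n' := by
  induction b with
  | zero => simp
  | succ n ih =>
    rw [List.replicate_succ', ← List.append_assoc, join_snoc _ _ (by simp [ht]), ih,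
      List.replicate_succ']
    simp

lemma join_replicate_blank (n : Nat) :
    PySem.Chars.join ['\n'] (List.replicate (n + 1) ([] : List Char))
      = List.replicate n '\n' := by
  induction n with
  | zero => simp [PySem.Chars.join_singleton]
  | succ m ih =>
    rw [List.replicate_succ, join_cons _ _ (by simp), ih, List.replicate_succ]
    simp

lemma collapseNl_nlfree_append (l X : List Char) (h : '\n' ∉ l) :
    collapseNl (l ++ X) = l ++ collapseNl X := by
  induction l with
  | nil => simp
  | cons c l' ih =>
    have hc : ¬ c = '\n' := fun hc => h (hc ▸ List.mem_cons_self ..)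
    rw [List.cons_append, collapseNl, if_neg hc,
      ih (fun hm => h (List.mem_cons.2 (Or.inr hm)))]
    simp

lemma collapseNl_replicate_append (j : Nat) (X : List Char) (hX : X.head? ≠ some '\n') :
    collapseNl (List.replicate j '\n' ++ X)
      = List.replicate (min j 3) '\n' ++ collapseNl X := by
  cases j with
  | zero => simp
  | succ j' =>
    have htw : X.takeWhile (· == '\n') = [] := by
      cases X with
      | nil => simp
      | cons x xs =>
        have : ¬ x = '\n' := fun hx => hX (by simp [hx])
        simp [this]
    have hdw : X.dropWhile (· == '\n') = X := by
      cases X with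
      | nil => simp
      | cons x xs =>
        have : ¬ x = '\n' := fun hx => hX (by simp [hx])
        simp [this]
    rw [List.replicate_succ, List.cons_append, collapseNl, if_pos rfl]
    have h1 : (List.replicate j' '\n' ++ X).takeWhile (· == '\n')
        = List.replicate j' '\n' := by
      rw [List.takeWhile_append]
      simp [htw]
    have h2 : (List.replicate j' '\n' ++ X).dropWhile (· == '\n') = X := by
      rw [List.dropWhile_append]
      simp [hdw]
    rw [h1, h2]
    congr 2
    simp [Nat.add_comm]

lemma strip_replicate_prefix (p : Nat) (Z : List Char) :
    PySem.Chars.strip (List.replicate p '\n' ++ Z) = PySem.Chars.strip Z := by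
  unfold PySem.Chars.strip PySem.Chars.lstrip
  congr 1
  rw [List.dropWhile_append]
  simp [PySem.Chars.isspace]

lemma rstrip_replicate_suffix (q : Nat) (Z : List Char) :
    PySem.Chars.rstrip (Z ++ List.replicate q '\n') = PySem.Chars.rstrip Z := by
  unfold PySem.Chars.rstrip
  congr 1
  rw [List.reverse_append, List.reverse_replicate, List.dropWhile_append]
  simp [PySem.Chars.isspace]

lemma strip_replicate_suffix (q : Nat) (Z : List Char) :
    PySem.Chars.strip (Z ++ List.replicate q '\n') = PySem.Chars.strip Z := by
  unfold PySem.Chars.strip PySem.Chars.lstrip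
  rw [List.dropWhile_append]
  by_cases h : (Z.dropWhile PySem.Chars.isspace).isEmpty
  · rw [if_pos h]
    rw [List.isEmpty_iff] at h
    rw [h, List.dropWhile_replicate]
    simp [PySem.Chars.isspace, PySem.Chars.rstrip]
  · rw [if_neg h]
    exact rstrip_replicate_suffix q _

lemma head_dropWhile_cons {p : List Char → Bool} {l : List (List Char)} {x : List Char}
    {xs : List (List Char)} (h : l.dropWhile p = x :: xs) : p x = false := by
  have := List.head_dropWhile_not p (l := l) (by simp [h])
  simpa [h] using this

lemma collapseNl_nil : collapseNl [] = [] := by simp [collapseNl]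

lemma collapseNl_replicate (q : Nat) :
    collapseNl (List.replicate q '\n') = List.replicate (min q 3) '\n' := by
  have := collapseNl_replicate_append q [] (by simp)
  simpa [collapseNl_nil] using this

lemma head?_join_nonblank (l' : List Char) (t' : List (List Char)) (Y : List Char)
    (hl' : l' ≠ []) (hnl : '\n' ∉ l') :
    (PySem.Chars.join ['\n'] (l' :: t') ++ Y).head? ≠ some '\n' := by
  cases l' with
  | nil => exact absurd rfl hl'
  | cons c cs =>
    have hc : c ≠ '\n' := fun hc => hnl (hc ▸ List.mem_cons_self ..)
    cases t' with
    | nil =>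
      rw [PySem.Chars.join_singleton]
      simpa using hc
    | cons y t2 =>
      rw [PySem.Chars.join_cons_cons]
      simpa using hc

lemma collapse_join_eq_fuel (n : Nat) : ∀ (m : List (List Char)) (q : Nat),
    m.length ≤ n → (∀ l ∈ m, '\n' ∉ l) → m.head? ≠ some [] → m.getLast? ≠ some [] →
    m ≠ [] →
    collapseNl (PySem.Chars.join ['\n'] m ++ List.replicate q '\n')
      = PySem.Chars.join ['\n'] (capA m 0) ++ List.replicate (min q 3) '\n' := by
  induction n with
  | zero =>
    intro m q hn _ _ _ hne
    cases m with
    | nil => exact absurd rfl hne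
    | cons a b => simp at hn
  | succ n ih =>
    intro m q hn hnl hhead hlast hne
    cases m with
    | nil => exact absurd rfl hne
    | cons l rest =>
      have hl : l ≠ [] := by simpa using hhead
      have hlnl : '\n' ∉ l := hnl l (List.mem_cons_self ..)
      cases rest with
      | nil =>
        rw [PySem.Chars.join_singleton]
        rw [collapseNl_nlfree_append _ _ hlnl, collapseNl_replicate,
          capA_cons_nonblank _ _ _ hl]
        simp [capA, PySem.Chars.join_singleton]
      | cons r0 rest0 =>
        -- decompose rest into a blank prefix and rest'
        set rest : List (List Char) := r0 :: rest0 with hrestdef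
        set t := rest.takeWhile List.isEmpty with htdef
        set rest' := rest.dropWhile List.isEmpty with hrest'def
        have hsplit : t ++ rest' = rest := List.takeWhile_append_dropWhile
        have htrep : t = List.replicate t.length [] := by
          apply List.eq_replicate_length.2
          intro x hx
          exact List.isEmpty_iff.1 (List.mem_takeWhile_imp (htdef ▸ hx))
        have hlastrest : rest.getLast? ≠ some [] := by
          rwa [List.getLast?_cons_cons] at hlast
        have hrest'ne : rest' ≠ [] := by
          intro hemp
          have : rest = t := by rw [← hsplit, hemp, List.append_nil]
          obtain ⟨a, ha⟩ : ∃ a, rest.getLast? = some a := by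
            cases h : rest.getLast? with
            | none => rw [List.getLast?_eq_none_iff] at h; simp [hrestdef] at h
            | some a => exact ⟨a, rfl⟩
          have ham : a ∈ rest := List.mem_of_getLast? ha
          have : a = [] := by
            have := List.mem_takeWhile_imp (x := a) (l := rest) (p := List.isEmpty)
            exact List.isEmpty_iff.1 (List.mem_takeWhile_imp (by rwa [← htdef, ← ‹rest = t›]))
          exact hlastrest (this ▸ ha)
        obtain ⟨l', t', hrest'⟩ := List.exists_cons_of_ne_nil hrest'ne
        have hl' : l' ≠ [] := by
          have := head_dropWhile_cons (hrest'def.symm ▸ hrest')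
          simpa using this
        have hrest'mem : ∀ x ∈ rest', x ∈ rest := by
          intro x hx
          exact (List.dropWhile_sublist _).mem (hrest'def ▸ hx)
        have hnl' : ∀ x ∈ rest', '\n' ∉ x := fun x hx =>
          hnl x (List.mem_cons.2 (Or.inr (hrest'mem x hx)))
        have hlast' : rest'.getLast? ≠ some [] := by
          rw [← hsplit] at hlastrest
          rwa [List.getLast?_append_of_ne_nil _ hrest'ne] at hlastrest
        have hlen' : rest'.length ≤ n := by
          have h1 : rest'.length ≤ rest.length := List.Sublist.length_le (List.dropWhile_sublist _)
          have h2 : rest.length + 1 ≤ n + 1 := by simpa using hn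
          omega
        -- IH applied to rest'
        have IH := ih rest' q hlen' hnl' (by simp [hrest', hl']) hlast' hrest'ne
        -- LHS computation
        have hjrest : PySem.Chars.join ['\n'] rest
            = List.replicate t.length '\n' ++ PySem.Chars.join ['\n'] rest' := by
          conv_lhs => rw [← hsplit, htrep]
          rw [join_replicate_prefix _ _ hrest'ne]
        have hLHS : collapseNl (PySem.Chars.join ['\n'] (l :: rest) ++ List.replicate q '\n')
            = l ++ (List.replicate (min (t.length + 1) 3) '\n'
                ++ collapseNl (PySem.Chars.join ['\n'] rest' ++ List.replicate q '\n')) := by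
          rw [join_cons _ _ (by simp [hrestdef]), hjrest]
          have : (l ++ '\n' :: (List.replicate t.length '\n' ++ PySem.Chars.join ['\n'] rest'))
              ++ List.replicate q '\n'
              = l ++ (List.replicate (t.length + 1) '\n'
                  ++ (PySem.Chars.join ['\n'] rest' ++ List.replicate q '\n')) := by
            rw [List.replicate_succ]
            simp
          rw [this, collapseNl_nlfree_append _ _ hlnl,
            collapseNl_replicate_append _ _ (by
              rw [hrest']
              exact head?_join_nonblank l' t' _ hl' (hnl' l' (hrest' ▸ List.mem_cons_self ..)))]
        -- RHS computation
        have hcaprest' : capA rest' 0 = l' :: capA t' 0 := by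
          rw [hrest', capA_cons_nonblank _ _ _ hl']
        have hcap : capA (l :: rest) 0
            = l :: (List.replicate (min t.length 2) [] ++ capA rest' 0) := by
          rw [capA_cons_nonblank _ _ _ hl]
          congr 1
          rw [← hsplit, capA_append, htrep]
          congr 1
          · rw [capA_replicate _ 0 (by omega)]
            have h2 : ((2 : Int) - 0).toNat = 2 := by decide
            rw [h2]
            simp
          · rw [hrest', capA_cons_nonblank _ _ _ hl', capA_cons_nonblank _ _ _ hl']
        have hRHS : PySem.Chars.join ['\n'] (capA (l :: rest) 0)
            = l ++ (List.replicate (min t.length 2 + 1) '\n'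
                ++ PySem.Chars.join ['\n'] (capA rest' 0)) := by
          rw [hcap, join_cons _ _ (by simp [hcaprest']),
            join_replicate_prefix _ _ (by simp [hcaprest'])]
          rw [← List.cons_append, ← List.replicate_succ, List.replicate_succ',
            List.append_assoc]
        rw [hLHS, IH, hRHS]
        have hmin : min (t.length + 1) 3 = min t.length 2 + 1 := by omega
        rw [hmin]
        simp

lemma strip_nil : PySem.Chars.strip [] = [] := by
  simp [PySem.Chars.strip, PySem.Chars.lstrip, PySem.Chars.rstrip]

lemma strip_replicate_nl (j : Nat) :
    PySem.Chars.strip (List.replicate j '\n') = [] := by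
  have := strip_replicate_prefix j []
  simpa [strip_nil] using this

lemma strip_eq_main (ls : List (List Char)) (hne : ls ≠ []) (hnl : ∀ l ∈ ls, '\n' ∉ l) :
    PySem.Chars.strip (PySem.Chars.join ['\n'] (capA ls 0))
      = PySem.Chars.strip (collapseNl (PySem.Chars.join ['\n'] ls)) := by
  set m1 := ls.dropWhile List.isEmpty with hm1def
  have hsplit1 : ls.takeWhile List.isEmpty ++ m1 = ls := List.takeWhile_append_dropWhile
  set a := (ls.takeWhile List.isEmpty).length with hadef
  have hatake : ls.takeWhile List.isEmpty = List.replicate a [] := by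
    apply List.eq_replicate_length.2
    intro x hx
    exact List.isEmpty_iff.1 (List.mem_takeWhile_imp hx)
  by_cases hm1 : m1 = []
  · -- ls is entirely blank lines
    have hlsrep : ls = List.replicate a [] := by
      rw [← hsplit1, hm1, List.append_nil, hatake]
    obtain ⟨a', ha'⟩ : ∃ a', a = a' + 1 := by
      cases ha : a with
      | zero => rw [ha] at hlsrep; simp at hlsrep; exact absurd hlsrep hne
      | succ k => exact ⟨k, rfl⟩
    rw [hlsrep, ha']
    rw [capA_replicate _ 0 (by omega)]
    have h2 : ((2 : Int) - 0).toNat = 2 := by decide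
    rw [h2]
    obtain ⟨k, hk⟩ : ∃ k, min (a' + 1) 2 = k + 1 := ⟨min a' 1, by omega⟩
    rw [hk, join_replicate_blank, join_replicate_blank, collapseNl_replicate,
      strip_replicate_nl, strip_replicate_nl]
  · -- ls has a nonblank line
    obtain ⟨h1, t1, hm1cons⟩ := List.exists_cons_of_ne_nil hm1
    have hh1 : h1 ≠ [] := by
      have := head_dropWhile_cons (p := List.isEmpty) (hm1def.symm ▸ hm1cons)
      simpa using this
    set m := (m1.reverse.dropWhile List.isEmpty).reverse with hmdef
    set b := (m1.reverse.takeWhile List.isEmpty).length with hbdef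
    have hbtake : m1.reverse.takeWhile List.isEmpty = List.replicate b [] := by
      apply List.eq_replicate_length.2
      intro x hx
      exact List.isEmpty_iff.1 (List.mem_takeWhile_imp hx)
    have hm1split : m1 = m ++ List.replicate b [] := by
      have := List.takeWhile_append_dropWhile
        (p := List.isEmpty) (l := m1.reverse)
      have h2 := congrArg List.reverse this
      rw [List.reverse_append, List.reverse_reverse] at h2
      rw [← h2, hbtake]
      simp [hmdef]
    have hmne : m ≠ [] := by
      intro hemp
      rw [hemp, List.nil_append] at hm1split
      have : h1 ∈ m1 := hm1cons ▸ List.mem_cons_self ..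
      rw [hm1split] at this
      exact hh1 (List.eq_of_mem_replicate this)
    obtain ⟨l0, t0, hmcons⟩ := List.exists_cons_of_ne_nil hmne
    have hl0 : l0 ≠ [] := by
      have hhead : m1.head? = some h1 := by rw [hm1cons]; rfl
      have : m.head? = some l0 := by rw [hmcons]; rfl
      rw [hm1split] at hhead
      rw [List.head?_append_of_ne_nil _ hmne] at hhead
      rw [this] at hhead
      exact (Option.some_inj.1 hhead) ▸ hh1
    have hmlast : m.getLast? ≠ some [] := by
      rw [hmdef]
      cases hd : m1.reverse.dropWhile List.isEmpty with
      | nil => exact absurd (by rw [hmdef, hd]; rfl) hmne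
      | cons x xs =>
        rw [List.reverse_cons, List.getLast?_concat]
        have := head_dropWhile_cons (p := List.isEmpty) hd
        simpa using this
    have hlssplit : ls = List.replicate a [] ++ (m ++ List.replicate b []) := by
      rw [← hsplit1, hatake, hm1split]
    have hmmem : ∀ x ∈ m, x ∈ ls := by
      intro x hx
      rw [hlssplit]
      simp [hx]
    have hmnl : ∀ x ∈ m, '\n' ∉ x := fun x hx => hnl x (hmmem x hx)
    have hcapm_ne : capA m 0 ≠ [] := by
      rw [hmcons, capA_cons_nonblank _ _ _ hl0]; simp
    -- A side
    have hAcap : capA ls 0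
        = List.replicate (min a 2) [] ++ (capA m 0 ++ List.replicate (min b 2) []) := by
      rw [hlssplit, capA_append, capA_replicate _ 0 (by omega), stA_replicate,
        capA_append]
      have h2 : ((2 : Int) - 0).toNat = 2 := by decide
      rw [h2]
      congr 1
      rw [stA_zero_of_last_nonblank _ _ hmlast hmne,
        capA_replicate _ 0 (by omega), h2]
      congr 1
      rw [hmcons, capA_cons_nonblank _ _ _ hl0, capA_cons_nonblank _ _ _ hl0]
    have hAjoin : PySem.Chars.join ['\n'] (capA ls 0)
        = List.replicate (min a 2) '\n'
            ++ (PySem.Chars.join ['\n'] (capA m 0) ++ List.replicate (min b 2) '\n') := by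
      rw [hAcap, join_replicate_prefix _ _ (by simp [hcapm_ne]),
        join_replicate_suffix _ _ hcapm_ne]
    -- B side
    have hBjoin : PySem.Chars.join ['\n'] ls
        = List.replicate a '\n'
            ++ (PySem.Chars.join ['\n'] m ++ List.replicate b '\n') := by
      rw [hlssplit, join_replicate_prefix _ _ (by simp [hmne]),
        join_replicate_suffix _ _ hmne]
    have hBcol : collapseNl (PySem.Chars.join ['\n'] ls)
        = List.replicate (min a 3) '\n'
            ++ (PySem.Chars.join ['\n'] (capA m 0) ++ List.replicate (min b 3) '\n') := by
      rw [hBjoin, collapseNl_replicate_append _ _ (by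
          rw [hmcons]
          exact head?_join_nonblank l0 t0 _ hl0 (hmnl l0 (hmcons ▸ List.mem_cons_self ..))),
        collapse_join_eq_fuel m.length m b le_rfl hmnl
          (by rw [hmcons]; simpa using hl0) hmlast hmne]
    rw [hAjoin, hBcol, strip_replicate_prefix, strip_replicate_prefix,
      strip_replicate_suffix, strip_replicate_suffix]

-- ===== VERDICT (by name: the statement is the Claim_ definition above) =====
theorem clean_output_spec : Claim_equal_clean_output := by
  intro text _
  show clean_output text = clean_output_alt text
  unfold clean_output clean_output_alt
  simp only [foldA_eq_capA, List.nil_append]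
  congr 1
  apply strip_eq_main
  · simp [splitOn_eq_splitNl, splitNl_ne_nil]
  · intro l hl
    simp only [splitOn_eq_splitNl, List.mem_map] at hl
    obtain ⟨l', hl', rfl⟩ := hl
    exact nl_not_mem_rstrip _ (nl_not_mem_splitNl _ _ hl')
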